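-- pv_equiv track=rewrite | github.com/Rucious-Aladdin/Preparation_for_coding_test | baekjoon/others/1700_멀티탭스케줄링.py | check
-- ===== SOURCE A (Python) =====
-- def check(seq, idx, plug_dict):
--     exist_plug = []
--     for k, v in plug_dict.items():
--         if v:
--             exist_plug.append(k)
--     exist_order = [int(1e9) for _ in range(len(exist_plug))]
--     exist_dict = {x:i for i, x in enumerate(exist_plug)}
--     idx2plug = {v:k for k, v in exist_dict.items()}
--
--     for i in range(len(seq) - 1, idx, -1):
--         if seq[i] in exist_plug:
--             if exist_order[exist_dict[seq[i]]] > i: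
--                 exist_order[exist_dict[seq[i]]] = i
--     return idx2plug[exist_order.index(max(exist_order))]
-- ===== SOURCE B (Python) =====
-- def check(seq, idx, plug_dict):
--     INF = int(1e9)
--     best_dev = None
--     best_next = -1
--     for dev, plugged in plug_dict.items():
--         if plugged:
--             nxt = INF
--             for i in range(idx + 1, len(seq)):
--                 if seq[i] == dev:
--                     nxt = min(nxt, i)
--             if best_dev is None or nxt > best_next:
--                 best_dev = dev
--                 best_next = nxt
--     if best_dev is None:
--         raise ValueError("no plugged device")
--     return best_dev
-- ===== Notes on version B (the rewrite author's own statement) =====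
-- stated objective: simpler
-- what changed: Replaces A's single backward pass over seq plus three auxiliary index structures (exist_order array, exist_dict, idx2plug) by a per-device forward min-scan for the next use and a running first-wins strict-> argmax over the plugged devices, returning the device directly with no index mapping.
import Mathlib
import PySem

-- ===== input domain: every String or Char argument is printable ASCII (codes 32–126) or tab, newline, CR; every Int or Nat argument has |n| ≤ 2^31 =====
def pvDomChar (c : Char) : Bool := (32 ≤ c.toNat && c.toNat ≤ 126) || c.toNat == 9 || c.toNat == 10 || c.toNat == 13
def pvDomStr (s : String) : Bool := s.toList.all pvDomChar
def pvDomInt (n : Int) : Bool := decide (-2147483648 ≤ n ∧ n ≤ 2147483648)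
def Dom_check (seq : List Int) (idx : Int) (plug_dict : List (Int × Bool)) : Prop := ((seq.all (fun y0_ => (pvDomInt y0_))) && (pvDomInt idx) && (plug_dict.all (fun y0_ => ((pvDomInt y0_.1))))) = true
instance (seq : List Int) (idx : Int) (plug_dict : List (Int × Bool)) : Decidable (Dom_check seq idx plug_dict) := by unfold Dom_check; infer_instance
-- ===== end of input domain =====

-- B replaces A's backward pass plus its three index structures (exist_order, exist_dict, idx2plug) by a per-device forward min-scan and a running first-wins argmax: simpler bookkeeping, same asymptotic cost.

-- ===== PORT A =====
def check (seq : List Int) (idx : Int) (plug_dict : List (Int × Bool)) : Int :=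
  let exist_plug : List Int :=
    plug_dict.foldl (fun acc kv => if kv.2 then acc ++ [kv.1] else acc) []
  let exist_order : List Int :=
    (PySem.List.pyRange 0 (exist_plug.length : Int) 1).map (fun _ => (1000000000 : Int))
  let exist_dict : PySem.Dict Int Int :=
    PySem.Dict.ofList ((PySem.List.enumerate exist_plug 0).map (fun p => (p.2, p.1)))
  let idx2plug : PySem.Dict Int Int :=
    PySem.Dict.ofList (exist_dict.items.map (fun p => (p.2, p.1)))
  let final : List Int :=
    (PySem.List.pyRange ((seq.length : Int) - 1) idx (-1)).foldl
      (fun ord i =>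
        if PySem.List.pyGetD seq i 0 ∈ exist_plug then
          (if PySem.List.pyGetD ord (exist_dict.getD (PySem.List.pyGetD seq i 0) 0) 0 > i then
            PySem.List.pySetD ord (exist_dict.getD (PySem.List.pyGetD seq i 0) 0) i
          else ord)
        else ord)
      exist_order
  idx2plug.getD
    (((PySem.List.index? final ((PySem.List.max? final (fun y => y)).getD 0)).getD 0 : Nat) : Int) 0

-- ===== PORT B =====
def check_alt (seq : List Int) (idx : Int) (plug_dict : List (Int × Bool)) : Int :=
  ((plug_dict.foldl
      (fun st kv =>
        if kv.2 then
          let nxt : Int :=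
            (PySem.List.pyRange (idx + 1) (seq.length : Int) 1).foldl
              (fun n i => if PySem.List.pyGetD seq i 0 == kv.1 then min n i else n)
              1000000000
          match st.1 with
          | none => (some kv.1, nxt)
          | some _ => if nxt > st.2 then (some kv.1, nxt) else st
        else st)
      ((none : Option Int), (-1 : Int))).1).getD 0

-- ===== PRECONDITION & SPEC =====
-- Pre_check admits exactly the inputs where A returns: it excludes inputs where A raises
-- (no truthy-plugged device → max([]) ValueError; idx ≤ -len(seq)-2 → IndexError in the
-- backward scan) and association lists with duplicate keys, which do not represent any
-- Python dict argument.
def Pre_check (seq : List Int) (idx : Int) (plug_dict : List (Int × Bool)) : Prop :=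
  (plug_dict.map (·.1)).Nodup ∧ plug_dict.any (fun kv => kv.2) = true ∧
    -(seq.length : Int) - 1 ≤ idx
instance (seq : List Int) (idx : Int) (plug_dict : List (Int × Bool)) : Decidable (Pre_check seq idx plug_dict) := by unfold Pre_check; infer_instance

def pvWitness_check : List Int × Int × (List (Int × Bool)) :=
  ([1, 2, 1], 0, [(1, true), (2, true)])

def Spec_check (seq : List Int) (idx : Int) (plug_dict : List (Int × Bool)) (out : Int) : Prop := out = check_alt seq idx plug_dict
instance (seq : List Int) (idx : Int) (plug_dict : List (Int × Bool)) (out : Int) : Decidable (Spec_check seq idx plug_dict out) := by unfold Spec_check; infer_instance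

-- ===== CLAIM (what is proved, stated in full; the proofs are below) =====
def Claim_equal_check : Prop := ∀ (seq : List Int) (idx : Int) (plug_dict : List (Int × Bool)), Dom_check seq idx plug_dict → Pre_check seq idx plug_dict → Spec_check seq idx plug_dict (check seq idx plug_dict)

-- ===== LEMMAS AND PROOFS =====

-- the next-use value both programs compute for a device d (B's inner loop, verbatim)
def nextUse (seq : List Int) (idx : Int) (d : Int) : Int :=
  (PySem.List.pyRange (idx + 1) (seq.length : Int) 1).foldl
    (fun n i => if PySem.List.pyGetD seq i 0 == d then min n i else n)
    1000000000

-- first-wins argmax over devices, the shape of B's outer loop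
def pickFrom (m : Int → Int) (b : Int) : List Int → Int
  | [] => b
  | d :: t => if m d > m b then pickFrom m d t else pickFrom m b t

-- exist_plug is the filtered key list
theorem exist_plug_eq (plug_dict : List (Int × Bool)) :
    plug_dict.foldl (fun acc kv => if kv.2 then acc ++ [kv.1] else acc) []
      = (plug_dict.filter (·.2)).map (·.1) := by
  simpa using PySem.List.foldl_append_if (·.2) (·.1) plug_dict []

-- B's outer fold, flattened to the filtered key list
theorem b_fold_eq (seq : List Int) (idx : Int) (pd : List (Int × Bool))
    (st : Option Int × Int) :
    pd.foldl
      (fun st kv =>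
        if kv.2 then
          let nxt : Int :=
            (PySem.List.pyRange (idx + 1) (seq.length : Int) 1).foldl
              (fun n i => if PySem.List.pyGetD seq i 0 == kv.1 then min n i else n)
              1000000000
          match st.1 with
          | none => (some kv.1, nxt)
          | some _ => if nxt > st.2 then (some kv.1, nxt) else st
        else st) st
    = ((pd.filter (·.2)).map (·.1)).foldl
        (fun st d =>
          match st.1 with
          | none => (some d, nextUse seq idx d)
          | some _ => if nextUse seq idx d > st.2 then (some d, nextUse seq idx d) else st) st := by
  induction pd generalizing st with
  | nil => rfl
  | cons kv pd ih =>
    by_cases hkv : kv.2 = true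
    · simp only [List.foldl_cons, List.filter_cons, hkv, if_true, List.map_cons, nextUse, ih]
    · simp only [List.foldl_cons, List.filter_cons, hkv, if_false, Bool.false_eq_true, ih]

theorem b_pick (seq : List Int) (idx : Int) (t : List Int) (b v : Int)
    (hv : v = nextUse seq idx b) :
    ((t.foldl
        (fun st d =>
          match st.1 with
          | none => (some d, nextUse seq idx d)
          | some _ => if nextUse seq idx d > st.2 then (some d, nextUse seq idx d) else st)
        (some b, v)).1).getD 0 = pickFrom (nextUse seq idx) b t := by
  induction t generalizing b v with
  | nil => simp [pickFrom]
  | cons d t ih =>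
    subst hv
    by_cases hd : nextUse seq idx d > nextUse seq idx b
    · simp only [List.foldl_cons, hd, if_true, pickFrom]
      exact ih d _ rfl
    · simp only [List.foldl_cons, hd, if_false, pickFrom]
      exact ih b _ rfl

-- applying the min-guard step once commutes with folding it over a list
theorem minguard_swap (q : Int → Bool) (L : List Int) (n i : Int) :
    L.foldl (fun n j => if q j then min n j else n) (if q i then min n i else n)
      = (if q i then min (L.foldl (fun n j => if q j then min n j else n) n) i
         else L.foldl (fun n j => if q j then min n j else n) n) := by
  induction L generalizing n with
  | nil => simp
  | cons j L ih =>
    simp only [List.foldl_cons]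
    rw [← ih]
    congr 1
    split_ifs <;> omega

-- the inner min-fold is direction-independent
theorem minguard_reverse (q : Int → Bool) (L : List Int) (n : Int) :
    L.reverse.foldl (fun n j => if q j then min n j else n) n
      = L.foldl (fun n j => if q j then min n j else n) n := by
  induction L generalizing n with
  | nil => rfl
  | cons i L ih =>
    simp only [List.reverse_cons, List.foldl_append, List.foldl_cons, List.foldl_nil, ih]
    rw [minguard_swap]

-- one step of A's order-updating loop, seen on a list in "P.map h" form
theorem ord_step (g : Int → Int) (P : List Int) (hP : P.Nodup)
    (lk : Int → Int) (hl : ∀ x ∈ P, lk x = ((P.idxOf x : Nat) : Int))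
    (h : Int → Int) (i : Int) :
    (if g i ∈ P then
      (if PySem.List.pyGetD (P.map h) (lk (g i)) 0 > i then
        PySem.List.pySetD (P.map h) (lk (g i)) i
      else P.map h)
    else P.map h)
    = P.map (fun d => if g i == d then min (h d) i else h d) := by
  by_cases hx : g i ∈ P
  · have hj : P.idxOf (g i) < P.length := List.idxOf_lt_length_of_mem hx
    have hjm : P.idxOf (g i) < (P.map h).length := by simpa using hj
    rw [if_pos hx, hl _ hx, PySem.List.pyGetD_natCast,
        List.getD_eq_getElem _ _ hjm]
    have hPj : P[P.idxOf (g i)] = g i := List.getElem_idxOf hj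
    have hget : (P.map h)[P.idxOf (g i)] = h (g i) := by
      rw [List.getElem_map]; rw [hPj]
    rw [hget]
    by_cases hgt : h (g i) > i
    · rw [if_pos hgt]
      have hset : PySem.List.pySetD (P.map h) ((P.idxOf (g i) : Nat) : Int) i
          = (P.map h).set (P.idxOf (g i)) i := by
        simp only [PySem.List.pySetD, PySem.List.pySet?, PySem.List.pyIdx?]
        simp [hj]
      rw [hset]
      apply List.ext_getElem
      · simp
      · intro p hp hp'
        have hpP : p < P.length := by simpa using hp'
        simp only [List.getElem_set, List.getElem_map]
        by_cases hpj : P.idxOf (g i) = p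
        · have hPp : P[p] = g i := by subst hpj; exact hPj
          rw [if_pos hpj, hPp]
          simp only [BEq.rfl, if_true]
          omega
        · rw [if_neg hpj]
          have hne : ¬ ((g i == P[p]) = true) := by
            intro hc
            have hc' : g i = P[p] := beq_iff_eq.mp hc
            exact hpj (hP.getElem_inj_iff.mp (hPj.trans hc'))
          rw [if_neg hne]
    · rw [if_neg hgt]
      apply (List.map_congr_left _).symm
      intro d hd
      by_cases hgd : (g i == d) = true
      · rw [if_pos hgd]
        have hde : g i = d := by simpa using hgd
        subst hde
        omega
      · rw [if_neg hgd]
  · rw [if_neg hx]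
    apply (List.map_congr_left _).symm
    intro d hd
    have hne : ¬ ((g i == d) = true) := by
      intro hc
      have : g i = d := by simpa using hc
      exact hx (this ▸ hd)
    rw [if_neg hne]

-- A's whole order loop in "map" form
theorem ord_fold (g : Int → Int) (P : List Int) (hP : P.Nodup)
    (lk : Int → Int) (hl : ∀ x ∈ P, lk x = ((P.idxOf x : Nat) : Int))
    (L : List Int) :
    ∀ (h : Int → Int),
    L.foldl (fun ord i =>
        if g i ∈ P then
          (if PySem.List.pyGetD ord (lk (g i)) 0 > i then
            PySem.List.pySetD ord (lk (g i)) i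
          else ord)
        else ord) (P.map h)
    = P.map (fun d => L.foldl (fun n i => if g i == d then min n i else n) (h d)) := by
  induction L with
  | nil => intro h; simp
  | cons i L ih =>
    intro h
    rw [List.foldl_cons, ord_step g P hP lk hl h i, ih]
    simp only [List.foldl_cons]

-- a Dict built from pairs with distinct keys has exactly those pairs as items
theorem ofList_items_fresh (prs : List (Int × Int)) (hnd : (prs.map (·.1)).Nodup) :
    (PySem.Dict.ofList prs).items = prs := by
  have h := PySem.Dict.items_foldl_insert_fresh prs Prod.fst Prod.snd PySem.Dict.empty
    (fun a _ => by simp) hnd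
  calc (PySem.Dict.ofList prs).items
      = (prs.foldl (fun d a => d.insert a.1 a.2) PySem.Dict.empty).items := rfl
    _ = PySem.Dict.empty.items ++ prs.map (fun a => (a.1, a.2)) := h
    _ = [] ++ prs.map (fun a => (a.1, a.2)) := rfl
    _ = prs := by simp

theorem exist_dict_items (P : List Int) (hP : P.Nodup) :
    (PySem.Dict.ofList ((PySem.List.enumerate P 0).map (fun p => (p.2, p.1)))).items
      = (PySem.List.enumerate P 0).map (fun p => (p.2, p.1)) := by
  apply ofList_items_fresh
  have h : (((PySem.List.enumerate P 0).map (fun p => (p.2, p.1))).map (·.1)) = P := by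
    rw [List.map_map]; exact PySem.List.map_snd_enumerate P 0
  rw [h]; exact hP

theorem exist_dict_getD_idx (P : List Int) (hP : P.Nodup) (x : Int) (hx : x ∈ P) :
    (PySem.Dict.ofList ((PySem.List.enumerate P 0).map (fun p => (p.2, p.1)))).getD x 0
      = ((P.idxOf x : Nat) : Int) := by
  have hj : P.idxOf x < P.length := List.idxOf_lt_length_of_mem hx
  apply PySem.Dict.getD_of_mem_items
  · rw [exist_dict_items P hP]
    have hmem : (((P.idxOf x : Int)), P[P.idxOf x]) ∈ PySem.List.enumerate P 0 := by
      rw [PySem.List.mem_enumerate_iff]; exact ⟨P.idxOf x, hj, by simp⟩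
    have := List.mem_map_of_mem (f := fun p => (p.2, p.1)) hmem
    simpa [List.getElem_idxOf hj] using this
  · simp only [PySem.Dict.keys]
    rw [exist_dict_items P hP]
    have h : (((PySem.List.enumerate P 0).map (fun p => (p.2, p.1))).map (fun x => x.1)) = P := by
      rw [List.map_map]; exact PySem.List.map_snd_enumerate P 0
    rw [h]; exact hP

theorem idx2plug_getD (P : List Int) (hP : P.Nodup) (j : Nat) :
    (PySem.Dict.ofList
      ((PySem.Dict.ofList ((PySem.List.enumerate P 0).map (fun p => (p.2, p.1)))).items.map
        (fun p => (p.2, p.1)))).getD (j : Int) 0 = P.getD j 0 := by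
  rw [exist_dict_items P hP]
  have hswap : (((PySem.List.enumerate P 0).map (fun p => (p.2, p.1))).map (fun p => (p.2, p.1)))
      = PySem.List.enumerate P 0 := by
    rw [List.map_map]; exact List.map_id _
  rw [hswap]
  have hfst : ((PySem.List.enumerate P 0).map (fun x => x.1)).Nodup := by
    rw [PySem.List.map_fst_enumerate]
    exact PySem.List.nodup_pyRange_one _ _
  have hitems : (PySem.Dict.ofList (PySem.List.enumerate P 0)).items
      = PySem.List.enumerate P 0 := ofList_items_fresh _ hfst
  have hkeys : (PySem.Dict.ofList (PySem.List.enumerate P 0)).keys.Nodup := by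
    simp only [PySem.Dict.keys]; rw [hitems]; exact hfst
  by_cases hj : j < P.length
  · rw [List.getD_eq_getElem _ _ hj]
    apply PySem.Dict.getD_of_mem_items _ _ hkeys
    rw [hitems, PySem.List.mem_enumerate_iff]
    exact ⟨j, hj, by simp⟩
  · have hnc : (PySem.Dict.ofList (PySem.List.enumerate P 0)).contains (j : Int) = false := by
      rw [Bool.eq_false_iff]
      intro hc
      have hm := (PySem.Dict.contains_iff_mem_keys _ _).mp hc
      simp only [PySem.Dict.keys] at hm
      rw [hitems, PySem.List.map_fst_enumerate, PySem.List.mem_pyRange_one] at hm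
      omega
    rw [PySem.Dict.getD_of_not_contains _ _ hnc, List.getD_eq_default _ _ (by omega)]

-- the initial all-10^9 order list, in "P.map h" form
theorem const_pyRange_map (l : List Int) (c : Int) :
    (PySem.List.pyRange 0 (l.length : Int) 1).map (fun _ => c) = l.map (fun _ => c) := by
  rw [List.map_const', List.map_const']
  congr 1
  rw [PySem.List.length_pyRange_one]
  omega

-- A's selection (index of the first maximum) equals the first-wins running argmax
theorem sel (m : Int → Int) : ∀ (t : List Int) (b : Int),
    (b :: t).getD ((PySem.List.index? ((b :: t).map m)
        ((t.map m).foldl max (m b))).getD 0) 0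
      = pickFrom m b t := by
  intro t
  induction t with
  | nil => intro b; simp [pickFrom]
  | cons d t ih =>
    intro b
    simp only [List.map_cons, List.foldl_cons, pickFrom]
    by_cases hdb : m d > m b
    · rw [if_pos hdb]
      have hmax : max (m b) (m d) = m d := max_eq_right (le_of_lt hdb)
      rw [hmax]
      have hle : m d ≤ (t.map m).foldl max (m d) := (PySem.List.le_foldl_max _ _).1
      have hbne : m b ≠ (t.map m).foldl max (m d) := ne_of_lt (lt_of_lt_of_le hdb hle)
      rw [PySem.List.index?_cons_of_ne _ hbne]
      have hmem : (t.map m).foldl max (m d) ∈ (m d :: t.map m) :=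
        PySem.List.max?_mem (PySem.List.max?_id_cons (m d) (t.map m))
      obtain ⟨k, hk⟩ := Option.isSome_iff_exists.mp
        ((PySem.List.index?_isSome_iff _ _).mpr hmem)
      rw [hk]
      simp only [Option.map_some, Option.getD_some, List.getD_cons_succ]
      have hihd := ih d
      rw [List.map_cons, hk] at hihd
      simpa using hihd
    · rw [if_neg hdb]
      have hmax : max (m b) (m d) = m b := max_eq_left (not_lt.mp hdb)
      rw [hmax]
      by_cases h0 : m b = (t.map m).foldl max (m b)
      · have h1 : PySem.List.index? (m b :: m d :: t.map m) ((t.map m).foldl max (m b))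
            = some 0 := by rw [← h0]; exact PySem.List.index?_cons_self _ _
        have h2 : PySem.List.index? (m b :: t.map m) ((t.map m).foldl max (m b))
            = some 0 := by rw [← h0]; exact PySem.List.index?_cons_self _ _
        rw [h1]
        have hihb := ih b
        rw [List.map_cons, h2] at hihb
        simpa using hihb
      · have hlt : m b < (t.map m).foldl max (m b) :=
          lt_of_le_of_ne (PySem.List.le_foldl_max _ _).1 h0
        have hdne : m d ≠ (t.map m).foldl max (m b) := by omega
        have hmem : (t.map m).foldl max (m b) ∈ (m b :: t.map m) :=
          PySem.List.max?_mem (PySem.List.max?_id_cons (m b) (t.map m))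
        have hmem' : (t.map m).foldl max (m b) ∈ t.map m := by
          rcases List.mem_cons.mp hmem with h | h
          · exact absurd h.symm h0
          · exact h
        obtain ⟨k, hk⟩ := Option.isSome_iff_exists.mp
          ((PySem.List.index?_isSome_iff _ _).mpr hmem')
        rw [PySem.List.index?_cons_of_ne _ h0, PySem.List.index?_cons_of_ne _ hdne, hk]
        simp only [Option.map_some, Option.getD_some, List.getD_cons_succ]
        have hihb := ih b
        rw [List.map_cons, PySem.List.index?_cons_of_ne _ h0, hk] at hihb
        simpa using hihb

theorem check_spec : Claim_equal_check := by
  intro seq idx pd _hdom hpre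
  obtain ⟨hnd, hany, _hidx⟩ := hpre
  unfold Spec_check
  have hPnd : ((pd.filter (·.2)).map (·.1)).Nodup := by
    have hsub : ((pd.filter (·.2)).map (·.1)).Sublist (pd.map (·.1)) :=
      (List.filter_sublist (l := pd)).map (·.1)
    exact hsub.nodup hnd
  obtain ⟨b, t, hbt⟩ : ∃ b t, (pd.filter (·.2)).map (·.1) = b :: t := by
    rcases h : (pd.filter (·.2)).map (·.1) with _ | ⟨b, t⟩
    · exfalso
      obtain ⟨kv, hkv, hkv2⟩ := List.any_eq_true.mp hany
      have hm : kv.1 ∈ (pd.filter (·.2)).map (·.1) :=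
        List.mem_map_of_mem (List.mem_filter.mpr ⟨hkv, hkv2⟩)
      rw [h] at hm; cases hm
    · exact ⟨b, t, h⟩
  have hB : check_alt seq idx pd = pickFrom (nextUse seq idx) b t := by
    simp only [check_alt]
    rw [b_fold_eq, hbt]
    simp only [List.foldl_cons]
    exact b_pick seq idx t b (nextUse seq idx b) rfl
  have hA : check seq idx pd = pickFrom (nextUse seq idx) b t := by
    simp only [check]
    rw [exist_plug_eq]
    rw [const_pyRange_map]
    rw [PySem.List.pyRange_neg_one_eq_reverse]
    rw [show (seq.length : Int) - 1 + 1 = (seq.length : Int) from by ring]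
    rw [ord_fold (fun i => PySem.List.pyGetD seq i 0) _ hPnd
      (fun x => (PySem.Dict.ofList
        ((PySem.List.enumerate ((pd.filter (·.2)).map (·.1)) 0).map (fun p => (p.2, p.1)))).getD x 0)
      (fun x hx => exist_dict_getD_idx _ hPnd x hx)]
    have hrev : ∀ d : Int,
        ((PySem.List.pyRange (idx + 1) (seq.length : Int) 1).reverse).foldl
          (fun n i => if PySem.List.pyGetD seq i 0 == d then min n i else n) 1000000000
        = nextUse seq idx d := fun d =>
      minguard_reverse (fun i => PySem.List.pyGetD seq i 0 == d) _ _
    simp only [hrev]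
    rw [idx2plug_getD _ hPnd, hbt]
    have hs := sel (nextUse seq idx) t b
    rw [List.map_cons, PySem.List.max?_id_cons]
    simp only [Option.getD_some]
    rw [List.map_cons] at hs
    exact hs
  rw [hA, hB]
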